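-- pv_equiv track=rewrite | github.com/varioustoxins/NEF-Pipelines | tools/frames/list.py | indent_with_prestring
-- ===== SOURCE A (Python) =====
-- def indent_with_prestring(text_block, pre_string):
--     raw_result = []
--     empty_prestring = " "* len(pre_string)
--     for i, string in enumerate(text_block.split('\n')):
--         if i == 0:
--             raw_result.append(f"{pre_string}{string}")
--         else:
--             raw_result.append(f"{empty_prestring}{string}")
--
--     return "\n".join(raw_result)
-- ===== SOURCE B (Python) =====
-- def indent_with_prestring(text_block, pre_string):
--     empty_prestring = " " * len(pre_string)
--     return pre_string + text_block.replace("\n", "\n" + empty_prestring)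
-- ===== Notes on version B (the rewrite author's own statement) =====
-- stated objective: simpler
-- what changed: replaces the split('\n')/enumerate/per-line-branch/join loop with a single str.replace that inserts the blank prefix after every newline, prepending pre_string once
import Mathlib
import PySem

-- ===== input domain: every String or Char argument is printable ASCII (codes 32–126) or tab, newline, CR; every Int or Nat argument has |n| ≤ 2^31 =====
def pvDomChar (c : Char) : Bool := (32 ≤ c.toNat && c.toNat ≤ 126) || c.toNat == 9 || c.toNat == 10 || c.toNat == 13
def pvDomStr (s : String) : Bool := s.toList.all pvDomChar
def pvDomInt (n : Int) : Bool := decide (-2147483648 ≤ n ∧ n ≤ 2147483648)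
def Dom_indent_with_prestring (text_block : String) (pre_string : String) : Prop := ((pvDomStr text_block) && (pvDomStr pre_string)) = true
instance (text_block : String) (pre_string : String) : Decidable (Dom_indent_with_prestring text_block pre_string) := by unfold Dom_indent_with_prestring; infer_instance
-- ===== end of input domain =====

-- B replaces A's split/enumerate/branch/join loop by one str.replace inserting the blank prefix after each newline (simpler decomposition, same cost).

-- ===== PORT A =====
def indent_with_prestring (text_block : String) (pre_string : String) : String :=
  -- empty_prestring = " " * len(pre_string)
  let empty_prestring : List Char :=
    PySem.List.pyRepeat [' '] (PySem.Chars.len pre_string.toList)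
  -- for i, string in enumerate(text_block.split('\n')): raw_result.append(...)
  let raw_result : List (List Char) :=
    (PySem.List.enumerate (PySem.Chars.splitOn text_block.toList ['\n'])).foldl
      (fun acc p =>
        acc ++ [if p.1 == 0 then pre_string.toList ++ p.2 else empty_prestring ++ p.2]) []
  -- "\n".join(raw_result)
  String.ofList (PySem.Chars.join ['\n'] raw_result)

-- ===== PORT B =====
def indent_with_prestring_alt (text_block : String) (pre_string : String) : String :=
  let empty_prestring : List Char :=
    PySem.List.pyRepeat [' '] (PySem.Chars.len pre_string.toList)
  -- pre_string + text_block.replace("\n", "\n" + empty_prestring)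
  String.ofList (pre_string.toList ++
    PySem.Chars.replace text_block.toList ['\n'] ('\n' :: empty_prestring))

-- ===== PRECONDITION & SPEC =====
def Spec_indent_with_prestring (text_block : String) (pre_string : String) (out : String) : Prop := out = indent_with_prestring_alt text_block pre_string
instance (text_block : String) (pre_string : String) (out : String) : Decidable (Spec_indent_with_prestring text_block pre_string out) := by unfold Spec_indent_with_prestring; infer_instance

-- ===== CLAIM (what is proved, stated in full; the proofs are below) =====
def Claim_equal_indent_with_prestring : Prop := ∀ (text_block : String) (pre_string : String), Dom_indent_with_prestring text_block pre_string → Spec_indent_with_prestring text_block pre_string (indent_with_prestring text_block pre_string)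

-- ===== LEMMAS AND PROOFS =====

-- the lines of cs when split at '\n': (first line, remaining lines)
def pvLines : List Char → List Char × List (List Char)
  | [] => ([], [])
  | c :: t => let p := pvLines t; if c = '\n' then ([], p.1 :: p.2) else (c :: p.1, p.2)

-- cs with every '\n' replaced by '\n' ++ pad
def pvRepl (pad : List Char) : List Char → List Char
  | [] => []
  | c :: t => if c = '\n' then '\n' :: pad ++ pvRepl pad t else c :: pvRepl pad t

theorem splitOn_go_eq (fuel : Nat) (l cur : List Char) (acc : List (List Char))
    (h : l.length ≤ fuel) :
    PySem.Chars.splitOn.go ['\n'] fuel l cur acc =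
      acc.reverse ++ ((cur.reverse ++ (pvLines l).1) :: (pvLines l).2) := by
  induction fuel generalizing l cur acc with
  | zero =>
      have : l = [] := by cases l <;> simp_all
      subst this; simp [PySem.Chars.splitOn.go, pvLines]
  | succ n ih =>
      cases l with
      | nil => simp [PySem.Chars.splitOn.go, pvLines]
      | cons c t =>
          by_cases hc : c = '\n'
          · subst hc
            rw [show PySem.Chars.splitOn.go ['\n'] (n+1) ('\n' :: t) cur acc =
                  PySem.Chars.splitOn.go ['\n'] n t [] (cur.reverse :: acc) by
                  simp [PySem.Chars.splitOn.go, List.isPrefixOf]]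
            rw [ih t [] (cur.reverse :: acc) (by simpa using Nat.le_of_succ_le_succ h)]
            simp [pvLines]
          · rw [show PySem.Chars.splitOn.go ['\n'] (n+1) (c :: t) cur acc =
                  PySem.Chars.splitOn.go ['\n'] n t (c :: cur) acc by
                  simp only [PySem.Chars.splitOn.go, List.isPrefixOf, Bool.and_true]
                  simp [(Ne.symm hc : '\n' ≠ c)]]
            rw [ih t (c :: cur) acc (by simpa using Nat.le_of_succ_le_succ h)]
            simp [pvLines, hc]

theorem splitOn_nl (cs : List Char) :
    PySem.Chars.splitOn cs ['\n'] = (pvLines cs).1 :: (pvLines cs).2 := by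
  rw [PySem.Chars.splitOn, splitOn_go_eq _ _ _ _ (by omega)]; simp

theorem replace_go_eq (pad : List Char) (fuel : Nat) (l acc : List Char)
    (h : l.length ≤ fuel) :
    PySem.Chars.replace.go ['\n'] ('\n' :: pad) fuel l acc =
      acc.reverse ++ pvRepl pad l := by
  induction fuel generalizing l acc with
  | zero =>
      have : l = [] := by cases l <;> simp_all
      subst this; simp [PySem.Chars.replace.go, pvRepl]
  | succ n ih =>
      cases l with
      | nil => simp [PySem.Chars.replace.go, pvRepl]
      | cons c t =>
          by_cases hc : c = '\n'
          · subst hc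
            rw [show PySem.Chars.replace.go ['\n'] ('\n' :: pad) (n+1) ('\n' :: t) acc =
                  PySem.Chars.replace.go ['\n'] ('\n' :: pad) n t
                    (('\n' :: pad).reverse ++ acc) by
                  simp [PySem.Chars.replace.go, List.isPrefixOf]]
            rw [ih t _ (by simpa using Nat.le_of_succ_le_succ h)]
            simp [pvRepl]
          · rw [show PySem.Chars.replace.go ['\n'] ('\n' :: pad) (n+1) (c :: t) acc =
                  PySem.Chars.replace.go ['\n'] ('\n' :: pad) n t (c :: acc) by
                  simp only [PySem.Chars.replace.go, List.isPrefixOf, Bool.and_true]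
                  simp [(Ne.symm hc : '\n' ≠ c)]]
            rw [ih t _ (by simpa using Nat.le_of_succ_le_succ h)]
            simp [pvRepl, hc]

theorem replace_nl (cs pad : List Char) :
    PySem.Chars.replace cs ['\n'] ('\n' :: pad) = pvRepl pad cs := by
  rw [PySem.Chars.replace]
  simp [replace_go_eq pad cs.length cs [] (le_refl _)]

theorem map_enumerate_pos (pl pad : List Char) (r : List (List Char)) (s : Int)
    (hs : 1 ≤ s) :
    (PySem.List.enumerate r s).map
        (fun p => if p.1 == 0 then pl ++ p.2 else pad ++ p.2) =
      r.map (fun x => pad ++ x) := by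
  induction r generalizing s with
  | nil => simp [PySem.List.enumerate]
  | cons h t ih =>
      rw [PySem.List.enumerate_cons]
      simp only [List.map_cons]
      rw [ih (s + 1) (by omega)]
      have : (s == 0) = false := by simp; omega
      simp [this]

theorem join_lines_eq (pad : List Char) (cs pl : List Char) :
    PySem.Chars.join ['\n']
        ((pl ++ (pvLines cs).1) :: (pvLines cs).2.map (fun x => pad ++ x)) =
      pl ++ pvRepl pad cs := by
  induction cs generalizing pl with
  | nil => simp [pvLines, pvRepl, PySem.Chars.join, List.intercalate]
  | cons c t ih =>
      simp only [pvLines, pvRepl]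
      by_cases hc : c = '\n'
      · simp only [if_pos hc]
        rw [List.map_cons, PySem.Chars.join_cons_cons, ih pad]
        simp
      · simp only [if_neg hc]
        simpa [List.append_assoc] using ih (pl ++ [c])

-- ===== VERDICT (by name: the statement is the Claim_ definition above) =====
theorem indent_with_prestring_spec : Claim_equal_indent_with_prestring := by
  intro t p _
  unfold Spec_indent_with_prestring indent_with_prestring indent_with_prestring_alt
  simp only [splitOn_nl, PySem.List.enumerate_cons,
    PySem.List.foldl_append_singleton_eq_map, List.nil_append, List.map_cons,
    replace_nl]
  rw [map_enumerate_pos _ _ _ _ (by omega)]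
  simp only [show ((0 : Int) == 0) = true from rfl, if_pos]
  rw [join_lines_eq]
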